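-- pv_equiv track=rewrite | github.com/MinjaeKimmm/FinAgentBenchRFT | grader.py | _should_keep_sample
-- ===== SOURCE A (Python) =====
-- from typing import List, Dict, Tuple, Optional, Any
--
-- def _should_keep_sample(sample: Dict) -> bool:
--     """Filter out all-zero samples and other poor quality samples"""
--
--     qrel = sample.get("qrel", {})
--     if not qrel:
--         return False
--
--     # Get all relevance scores
--     scores = list(qrel.values())
--
--     # Filter 1: All zeros (no learning signal)
--     if all(score == 0 for score in scores):
--         return False
--
--     # Filter 2: All same non-zero values (no ranking preference)
--     unique_scores = set(scores)
--     if len(unique_scores) == 1 and list(unique_scores)[0] != 0: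
--         return False
--
--     return True
-- ===== SOURCE B (Python) =====
-- def _should_keep_sample(sample) -> bool:
--     """Keep iff the qrel carries at least two distinct relevance values."""
--     return len(set(sample.get("qrel", {}).values())) >= 2
-- ===== Notes on version B (the rewrite author's own statement) =====
-- stated objective: simpler
-- what changed: B collapses A's empty-check, all-zero scan and all-same-nonzero branch into one test: keep iff the set of qrel values has at least two distinct elements.
import Mathlib
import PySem

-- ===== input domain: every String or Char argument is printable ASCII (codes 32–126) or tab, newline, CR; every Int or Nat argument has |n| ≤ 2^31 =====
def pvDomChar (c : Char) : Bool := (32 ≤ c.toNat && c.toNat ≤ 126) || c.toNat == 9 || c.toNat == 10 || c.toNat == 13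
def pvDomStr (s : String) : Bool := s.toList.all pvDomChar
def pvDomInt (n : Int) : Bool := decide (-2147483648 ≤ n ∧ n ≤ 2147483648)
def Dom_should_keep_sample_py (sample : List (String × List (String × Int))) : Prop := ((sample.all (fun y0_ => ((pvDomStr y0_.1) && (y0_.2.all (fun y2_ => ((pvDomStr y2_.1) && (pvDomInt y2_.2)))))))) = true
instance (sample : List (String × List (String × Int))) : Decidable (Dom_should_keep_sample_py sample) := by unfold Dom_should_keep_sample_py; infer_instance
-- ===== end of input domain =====

-- One line: B replaces A's empty-check, all-zero scan and all-same-nonzero branch by the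
-- single test "at least two distinct qrel values" (objective: simpler).

-- ===== PORT A =====
def should_keep_sample_py (sample : List (String × List (String × Int))) : Bool :=
  let qrel := (PySem.Dict.mk sample).getD "qrel" []
  if qrel = [] then false          -- "if not qrel: return False"
  else
    let scores := (PySem.Dict.mk qrel).values
    if scores.all (fun score => score == 0) then false   -- "all(score == 0 for score in scores)"
    else
      let unique_scores : PySem.Set Int := PySem.Set.ofList scores
      -- "len(unique_scores) == 1 and list(unique_scores)[0] != 0"; the [0] access is
      -- guarded by the length-1 test, so getD 0 0 is exact here
      if unique_scores.length = 1 ∧ unique_scores.getD 0 0 ≠ 0 then false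
      else true

-- ===== PORT B =====
def should_keep_sample_py_alt (sample : List (String × List (String × Int))) : Bool :=
  decide (2 ≤ (PySem.Set.ofList ((PySem.Dict.mk ((PySem.Dict.mk sample).getD "qrel" [])).values)).length)

-- ===== PRECONDITION & SPEC =====
def Spec_should_keep_sample_py (sample : List (String × List (String × Int))) (out : Bool) : Prop := out = should_keep_sample_py_alt sample
instance (sample : List (String × List (String × Int))) (out : Bool) : Decidable (Spec_should_keep_sample_py sample out) := by unfold Spec_should_keep_sample_py; infer_instance

-- ===== CLAIM (what is proved, stated in full; the proofs are below) =====
def Claim_equal_should_keep_sample_py : Prop := ∀ (sample : List (String × List (String × Int))), Dom_should_keep_sample_py sample → Spec_should_keep_sample_py sample (should_keep_sample_py sample)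

-- ===== LEMMAS AND PROOFS =====

-- a nodup list all of whose elements are `a`, containing `a`, is `[a]`
theorem nodup_all_eq_singleton {a : Int} {u : List Int} (hn : u.Nodup)
    (hmem : a ∈ u) (hall : ∀ x ∈ u, x = a) : u = [a] := by
  match u, hmem with
  | [x], _ =>
    simp_all
  | x :: y :: t, _ =>
    have hx := hall x (by simp)
    have hy := hall y (by simp)
    subst hx; rw [hy] at hn; simp at hn

theorem ofList_const {a : Int} {l : List Int} (hne : l ≠ [])
    (hall : ∀ x ∈ l, x = a) : PySem.Set.ofList l = [a] := by
  have hmem : a ∈ PySem.Set.ofList l := by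
    obtain ⟨x, hx⟩ := List.exists_mem_of_ne_nil l hne
    rw [PySem.Set.mem_ofList]; exact (hall x hx) ▸ hx
  refine nodup_all_eq_singleton (PySem.Set.nodup_ofList l) hmem ?_
  intro x hx
  exact hall x ((PySem.Set.mem_ofList _ _).mp hx)

theorem values_ne_nil {qrel : List (String × Int)} (h : qrel ≠ []) :
    (PySem.Dict.mk qrel).values ≠ [] := by
  cases qrel with
  | nil => exact absurd rfl h
  | cons p t => simp [PySem.Dict.values]

theorem should_keep_main (sample : List (String × List (String × Int))) :
    should_keep_sample_py sample = should_keep_sample_py_alt sample := by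
  unfold should_keep_sample_py should_keep_sample_py_alt
  set qrel := (PySem.Dict.mk sample).getD "qrel" [] with hq
  by_cases hqe : qrel = []
  · simp [hqe, PySem.Dict.values, PySem.Set.ofList]
  · simp only [if_neg hqe]
    set scores := (PySem.Dict.mk qrel).values with hs
    have hsne : scores ≠ [] := values_ne_nil hqe
    by_cases hz : scores.all (fun score => score == 0)
    · -- all zero: the set is [0], length 1
      have : PySem.Set.ofList scores = [0] := by
        refine ofList_const hsne ?_
        intro x hx
        have := (List.all_eq_true.mp hz) x hx
        simpa using this
      simp [hz, this]
    · simp only [if_neg hz]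
      set u : PySem.Set Int := PySem.Set.ofList scores with hu
      have hune : u ≠ [] := by
        obtain ⟨x, hx⟩ := List.exists_mem_of_ne_nil scores hsne
        intro h0
        have : x ∈ u := (PySem.Set.mem_ofList _ _).mpr hx
        simp [h0] at this
      by_cases h1 : u.length = 1
      · -- singleton set: its element is nonzero (not all scores are 0)
        obtain ⟨a, ha⟩ : ∃ a, u = [a] := by
          match u, h1 with
          | [a], _ => exact ⟨a, rfl⟩
        have hane : a ≠ 0 := by
          intro h0
          apply hz
          rw [List.all_eq_true]
          intro x hx
          have : x ∈ u := (PySem.Set.mem_ofList _ _).mpr hx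
          rw [ha] at this; simp at this
          simp [this, h0]
        simp [ha, hane]
      · have h2 : 2 ≤ u.length := by
          have : u.length ≠ 0 := by simpa using hune
          omega
        simp [h1, h2]

-- ===== VERDICT (by name: the statement is the Claim_ definition above) =====
theorem should_keep_sample_py_spec : Claim_equal_should_keep_sample_py := by
  intro sample _
  unfold Spec_should_keep_sample_py
  exact should_keep_main sample
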